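-- pv_equiv track=rewrite | github.com/shreyash-mane/data-debugging-tool | backend/services/cleaning/audit.py | filter_audit
-- ===== SOURCE A (Python) =====
-- from typing import Any
--
-- def filter_audit(
--     audit_log: list[dict[str, Any]],
--     layer: str | None = None,
--     column: str | None = None,
--     action: str | None = None,
-- ) -> list[dict[str, Any]]:
--     """Return a filtered view of the audit log."""
--     result = audit_log
--     if layer:
--         result = [e for e in result if e.get("layer") == layer]
--     if column:
--         result = [e for e in result if e.get("column") == column]
--     if action:
--         result = [e for e in result if e.get("action") == action]
--     return result
-- ===== SOURCE B (Python) =====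
-- def filter_audit(audit_log, layer=None, column=None, action=None):
--     """Single pass: keep entries matching every active (truthy) filter."""
--     if not (layer or column or action):
--         return audit_log
--     return [
--         e for e in audit_log
--         if (not layer or e.get("layer") == layer)
--         and (not column or e.get("column") == column)
--         and (not action or e.get("action") == action)
--     ]
-- ===== Notes on version B (the rewrite author's own statement) =====
-- stated objective: simpler
-- what changed: Replaces A's three sequential filtering passes (one intermediate list per active filter) with a single list comprehension that checks all three conditions at once, plus an early return when no filter is active.
import Mathlib
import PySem

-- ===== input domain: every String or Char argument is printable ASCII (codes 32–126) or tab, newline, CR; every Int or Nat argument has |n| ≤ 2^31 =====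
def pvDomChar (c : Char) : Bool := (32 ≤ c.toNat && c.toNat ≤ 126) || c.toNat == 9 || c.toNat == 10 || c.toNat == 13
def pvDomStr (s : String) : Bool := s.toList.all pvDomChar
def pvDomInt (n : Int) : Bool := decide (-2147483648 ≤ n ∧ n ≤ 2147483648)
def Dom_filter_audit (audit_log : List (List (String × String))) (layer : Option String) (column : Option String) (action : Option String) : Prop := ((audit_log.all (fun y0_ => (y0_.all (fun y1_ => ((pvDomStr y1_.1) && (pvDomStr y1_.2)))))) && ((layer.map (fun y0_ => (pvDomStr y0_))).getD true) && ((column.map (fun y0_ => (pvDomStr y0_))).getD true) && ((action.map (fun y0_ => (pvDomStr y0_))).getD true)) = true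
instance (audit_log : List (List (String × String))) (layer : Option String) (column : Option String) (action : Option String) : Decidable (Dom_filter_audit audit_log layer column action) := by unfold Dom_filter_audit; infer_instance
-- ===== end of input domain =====

-- ===== PORT A =====
-- Header: B replaces A's three sequential filter passes with one single-pass comprehension (objective: simpler); return value only.
-- gate mirrors one `if <f>: result = [e for e in result if e.get(key) == <f>]` step of A
def pvGate (key : String) (o : Option String) (l : List (List (String × String))) : List (List (String × String)) :=
  match o with
  | none => l
  | some s => if s = "" then l else l.filter (fun e => (PySem.Dict.mk e).get? key == some s)

def filter_audit (audit_log : List (List (String × String))) (layer : Option String) (column : Option String) (action : Option String) : List (List (String × String)) :=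
  let result := audit_log
  let result := pvGate "layer" layer result
  let result := pvGate "column" column result
  let result := pvGate "action" action result
  result


-- ===== PORT B =====
-- Python truthiness of a str|None filter value
def pvTruthy (o : Option String) : Bool :=
  match o with
  | none => false
  | some s => s != ""

-- `(not <f> or e.get(key) == <f>)`
def pvKeep (o : Option String) (key : String) (e : List (String × String)) : Bool :=
  match o with
  | none => true
  | some s => if s = "" then true else (PySem.Dict.mk e).get? key == some s

def filter_audit_alt (audit_log : List (List (String × String))) (layer : Option String) (column : Option String) (action : Option String) : List (List (String × String)) :=
  if !(pvTruthy layer || pvTruthy column || pvTruthy action) then audit_log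
  else audit_log.filter (fun e => pvKeep layer "layer" e && pvKeep column "column" e && pvKeep action "action" e)


-- ===== PRECONDITION & SPEC =====
def Spec_filter_audit (audit_log : List (List (String × String))) (layer : Option String) (column : Option String) (action : Option String) (out : List (List (String × String))) : Prop := out = filter_audit_alt audit_log layer column action
instance (audit_log : List (List (String × String))) (layer : Option String) (column : Option String) (action : Option String) (out : List (List (String × String))) : Decidable (Spec_filter_audit audit_log layer column action out) := by unfold Spec_filter_audit; infer_instance

-- ===== CLAIM (what is proved, stated in full; the proofs are below) =====
def Claim_equal_filter_audit : Prop := ∀ (audit_log : List (List (String × String))) (layer : Option String) (column : Option String) (action : Option String), Dom_filter_audit audit_log layer column action → Spec_filter_audit audit_log layer column action (filter_audit audit_log layer column action)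

-- ===== LEMMAS AND PROOFS =====

theorem pvKeep_true_of_off (o : Option String) (key : String) (h : o = none ∨ o = some "") (l : List (List (String × String))) :
    l.filter (pvKeep o key) = l := by
  apply List.filter_eq_self.mpr
  intro a _
  rcases h with h | h <;> simp [h, pvKeep]

theorem pvGate_eq_filter (key : String) (o : Option String) (l : List (List (String × String))) :
    pvGate key o l = l.filter (pvKeep o key) := by
  cases o with
  | none => rw [pvKeep_true_of_off _ _ (Or.inl rfl)]; rfl
  | some s =>
    by_cases h : s = ""
    · subst h; rw [pvKeep_true_of_off _ _ (Or.inr rfl)]; simp [pvGate]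
    · simp only [pvGate, if_neg h]
      apply List.filter_congr
      intro e _
      simp [pvKeep, h]

theorem pvKeep_of_not_truthy (o : Option String) (key : String) (e : List (String × String))
    (h : pvTruthy o = false) : pvKeep o key e = true := by
  cases o with
  | none => simp [pvKeep]
  | some s =>
    simp only [pvTruthy, bne_eq_false_iff_eq] at h
    simp [pvKeep, h]

-- ===== VERDICT (by name: the statement is the Claim_ definition above) =====
theorem filter_audit_spec : Claim_equal_filter_audit := by
  intro audit_log layer column action _
  unfold Spec_filter_audit filter_audit filter_audit_alt
  simp only [pvGate_eq_filter, List.filter_filter]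
  by_cases h : (pvTruthy layer || pvTruthy column || pvTruthy action) = true
  · rw [h]
    simp only [Bool.not_true, Bool.false_eq_true, if_false]
    apply List.filter_congr
    intro e _
    simp [Bool.and_comm, Bool.and_left_comm]
  · rw [Bool.not_eq_true] at h
    obtain ⟨h12, h3⟩ := Bool.or_eq_false_iff.mp h
    obtain ⟨h1, h2⟩ := Bool.or_eq_false_iff.mp h12
    rw [h1, h2, h3]
    simp only [Bool.or_self, Bool.not_false, if_true]
    apply List.filter_eq_self.mpr
    intro a _
    simp [pvKeep_of_not_truthy _ _ a h1, pvKeep_of_not_truthy _ _ a h2,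
      pvKeep_of_not_truthy _ _ a h3]
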